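-- pv_equiv track=rewrite | github.com/Lightblues/Leetcode | algorithm-ds-templates/DS-数据结构/SegTree-线段树/segment-tree.py | handleQuery
-- ===== SOURCE A (Python) =====
-- from typing import List
--
-- def handleQuery(nums1: List[int], nums2: List[int], queries: List[List[int]]) -> List[int]:
--     # 思路2: #线段树 #模版题 #题型 见 [segment-tree]
--     n = len(nums1)
--     cnt1 = [0] * (4 * n)        # 维护的特殊区间; 注意从1开始
--     flip = [False] * (4 * n)
--
--     def maintain(o: int) -> None:
--         # 维护cnt区间, 在 build, update 时调用
--         cnt1[o] = cnt1[o * 2] + cnt1[o * 2 + 1]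
--
--     def do(o: int, l: int, r: int) -> None:
--         # 执行反转操作; lazy
--         cnt1[o] = r - l + 1 - cnt1[o]
--         flip[o] = not flip[o]
--
--     # 初始化线段树   o,l,r=1,1,n
--     def build(o: int, l: int, r: int) -> None:
--         if l == r:
--             cnt1[o] = nums1[l - 1]  # 注意下标从1开始
--             return
--         m = (l + r) // 2
--         build(o * 2, l, m)
--         build(o * 2 + 1, m + 1, r)
--         maintain(o)
--
--     # 反转区间 [L,R]   o,l,r=1,1,n
--     def update(o: int, l: int, r: int, L: int, R: int) -> None:
--         if L <= l and r <= R: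
--             do(o, l, r) # [l,r] 被完整包含, lazy
--             return
--         m = (l + r) // 2
--         # lazy标记下传
--         if flip[o]:
--             do(o * 2, l, m)
--             do(o * 2 + 1, m + 1, r)
--             flip[o] = False
--         if m >= L: update(o * 2, l, m, L, R)
--         if m < R: update(o * 2 + 1, m + 1, r, L, R)
--         maintain(o)     # 维护区间
--
--     build(1, 1, n)
--     ans, s = [], sum(nums2)
--     for op, l, r in queries:
--         if op == 1: update(1, 1, n, l + 1, r + 1)   # 注意idx转换
--         elif op == 2: s += l * cnt1[1]
--         else: ans.append(s)
--     return ans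
-- ===== SOURCE B (Python) =====
-- from typing import List
--
-- def handleQuery(nums1: List[int], nums2: List[int], queries: List[List[int]]) -> List[int]:
--     # Direct range flipping on a copy of the bits, with a running ones counter,
--     # instead of a lazy segment tree.
--     bits = list(nums1)
--     ones = sum(bits)
--     s = sum(nums2)
--     ans = []
--     for op, l, r in queries:
--         if op == 1:
--             for i in range(l, r + 1):
--                 old = bits[i]
--                 bits[i] = 1 - old
--                 ones += 1 - 2 * old
--         elif op == 2:
--             s += l * ones
--         else:
--             ans.append(s)
--     return ans
-- ===== Notes on version B (the rewrite author's own statement) =====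
-- stated objective: simpler
-- what changed: Replaces the lazy segment tree (build/update recursion over a 4n-node array with pending-flip marks) by a direct loop that flips the affected range of a plain copy of the bits while maintaining a single running ones counter.
-- outside the precondition, e.g. on handleQuery([1], [0], [[1, 1, 0], [2, 1, 0], [3, 0, 0]]): A returns [0], B returns [1]; on handleQuery([1, 0], [0], [[1, -1, 0], [2, 1, 0], [3, 0, 0]]): A returns [0], B returns [1]
import Mathlib
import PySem

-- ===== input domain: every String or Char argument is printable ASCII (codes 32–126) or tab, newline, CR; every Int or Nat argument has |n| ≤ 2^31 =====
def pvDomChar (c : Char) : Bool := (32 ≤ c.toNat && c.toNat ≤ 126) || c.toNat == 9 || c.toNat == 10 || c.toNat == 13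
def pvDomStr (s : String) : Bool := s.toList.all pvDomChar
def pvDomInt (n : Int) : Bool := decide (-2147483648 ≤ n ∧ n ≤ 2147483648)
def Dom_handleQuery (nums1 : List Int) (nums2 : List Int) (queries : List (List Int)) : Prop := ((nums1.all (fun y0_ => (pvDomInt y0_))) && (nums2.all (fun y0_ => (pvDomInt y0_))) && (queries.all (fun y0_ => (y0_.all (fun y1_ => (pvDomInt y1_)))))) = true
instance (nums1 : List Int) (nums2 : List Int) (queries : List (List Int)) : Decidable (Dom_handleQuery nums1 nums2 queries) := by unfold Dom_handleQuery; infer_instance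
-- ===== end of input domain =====

-- B replaces A's lazy segment tree by direct range flipping on a copy of the bits with a
-- running ones counter (objective: simpler). Neither version mutates its arguments.


-- ===== PORT A =====
-- The Python lists cnt1/flip of length 4*n are represented as total maps Int → Int / Int → Bool
-- (node indices touched by the algorithm stay inside [1, 4n) on Pre_, where list indexing is exact).
structure AST where
  cnt : Int → Int
  flip : Int → Bool

def pvMaintain (σ : AST) (o : Int) : AST :=
  { σ with cnt := Function.update σ.cnt o (σ.cnt (o * 2) + σ.cnt (o * 2 + 1)) }

def pvDo (σ : AST) (o l r : Int) : AST :=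
  { cnt := Function.update σ.cnt o (r - l + 1 - σ.cnt o),
    flip := Function.update σ.flip o (!σ.flip o) }

-- nums1[l-1]: l-1 ∈ [0, n) at every leaf reached from the root call on Pre_, where pyGetD is exact
def pvBuild (nums1 : List Int) : Nat → Int → Int → Int → AST → AST
  | 0, _, _, _, σ => σ   -- fuel only makes the recursion total; n+1 ≥ recursion depth on Pre_
  | fuel + 1, o, l, r, σ =>
    if l = r then { σ with cnt := Function.update σ.cnt o (PySem.List.pyGetD nums1 (l - 1) 0) }
    else
      let m := PySem.Int.floordiv (l + r) 2
      let σ1 := pvBuild nums1 fuel (o * 2) l m σ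
      let σ2 := pvBuild nums1 fuel (o * 2 + 1) (m + 1) r σ1
      pvMaintain σ2 o

def pvUpdate : Nat → Int → Int → Int → Int → Int → AST → AST
  | 0, _, _, _, _, _, σ => σ   -- fuel only makes the recursion total; n+1 ≥ recursion depth on Pre_
  | fuel + 1, o, l, r, L, R, σ =>
    if L ≤ l ∧ r ≤ R then pvDo σ o l r
    else
      let m := PySem.Int.floordiv (l + r) 2
      let σ1 :=
        if σ.flip o then
          let σa := pvDo σ (o * 2) l m
          let σb := pvDo σa (o * 2 + 1) (m + 1) r
          { σb with flip := Function.update σb.flip o false }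
        else σ
      let σ2 := if L ≤ m then pvUpdate fuel (o * 2) l m L R σ1 else σ1
      let σ3 := if m < R then pvUpdate fuel (o * 2 + 1) (m + 1) r L R σ2 else σ2
      pvMaintain σ3 o

def handleQuery (nums1 : List Int) (nums2 : List Int) (queries : List (List Int)) : List Int :=
  let n : Int := nums1.length
  let σ0 : AST := ⟨fun _ => 0, fun _ => false⟩           -- cnt1 = [0]*(4n), flip = [False]*(4n)
  let σb := pvBuild nums1 (n.toNat + 1) 1 1 n σ0          -- build(1, 1, n)
  (queries.foldl (fun (st : AST × List Int × Int) q =>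
      match q with
      | [op, l, r] =>
        if op = 1 then (pvUpdate (n.toNat + 1) 1 1 n (l + 1) (r + 1) st.1, st.2.1, st.2.2)
        else if op = 2 then (st.1, st.2.1, st.2.2 + l * st.1.cnt 1)
        else (st.1, st.2.1 ++ [st.2.2], st.2.2)
      | _ => st                                           -- unpacking 'op, l, r' raises: outside Pre_
    ) (σb, ([] : List Int), nums2.sum)).2.1

-- ===== PORT B =====
def handleQuery_alt (nums1 : List Int) (nums2 : List Int) (queries : List (List Int)) : List Int :=
  (queries.foldl (fun (st : List Int × Int × Int × List Int) q =>
      -- 'for op, l, r in queries': positional reads; exact on Pre_ (every query is a triple)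
      let op := q.getD 0 0
      let l := q.getD 1 0
      let r := q.getD 2 0
      if op = 1 then
        -- bits[i] with 0 ≤ i < len(bits) on Pre_, where pyGetD/pySetD are exact
        let p := (PySem.List.pyRange l (r + 1) 1).foldl
          (fun (p : List Int × Int) i =>
            let old := PySem.List.pyGetD p.1 i 0
            (PySem.List.pySetD p.1 i (1 - old), p.2 + (1 - 2 * old)))
          (st.1, st.2.1)
        (p.1, p.2, st.2.2)
      else if op = 2 then (st.1, st.2.1, st.2.2.1 + l * st.2.1, st.2.2.2)
      else (st.1, st.2.1, st.2.2.1, st.2.2.2 ++ [st.2.2.1])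
    ) (nums1, nums1.sum, nums2.sum, ([] : List Int))).2.2.2

-- ===== PRECONDITION & SPEC =====
-- Pre_ restricts to the problem's natural domain: nums1 nonempty (A's build recursion never
-- terminates on []), every query a triple (unpacking raises otherwise), and every flip query
-- with 0 ≤ l ≤ r < n: outside that A's update recursion may diverge, B's bits[i] may raise
-- IndexError or wrap a negative index, and where both return (e.g. l > r with n = 1) A's value
-- is an accident of an unguarded 'maintain' on untouched tree cells.
def Pre_handleQuery (nums1 : List Int) (nums2 : List Int) (queries : List (List Int)) : Prop :=
  nums1 ≠ [] ∧ ∀ q ∈ queries, q.length = 3 ∧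
    (q.getD 0 0 = 1 → 0 ≤ q.getD 1 0 ∧ q.getD 1 0 ≤ q.getD 2 0 ∧ q.getD 2 0 < (nums1.length : Int))
instance (nums1 : List Int) (nums2 : List Int) (queries : List (List Int)) : Decidable (Pre_handleQuery nums1 nums2 queries) := by unfold Pre_handleQuery; infer_instance

def pvWitness_handleQuery : List Int × List Int × List (List Int) :=
  ([1, 0, 1], [2, 3, 4], [[1, 0, 1], [2, 2, 0], [3, 0, 0], [1, 1, 2], [3, 0, 0]])

def Spec_handleQuery (nums1 : List Int) (nums2 : List Int) (queries : List (List Int)) (out : List Int) : Prop := out = handleQuery_alt nums1 nums2 queries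
instance (nums1 : List Int) (nums2 : List Int) (queries : List (List Int)) (out : List Int) : Decidable (Spec_handleQuery nums1 nums2 queries out) := by unfold Spec_handleQuery; infer_instance

-- ===== CLAIM (what is proved, stated in full; the proofs are below) =====
def Claim_equal_handleQuery : Prop := ∀ (nums1 : List Int) (nums2 : List Int) (queries : List (List Int)), Dom_handleQuery nums1 nums2 queries → Pre_handleQuery nums1 nums2 queries → Spec_handleQuery nums1 nums2 queries (handleQuery nums1 nums2 queries)

-- ===== LEMMAS AND PROOFS =====

-- i is in the subtree rooted at node o of the implicit heap-indexed tree
def Desc (o i : Int) : Prop := ∃ k : Nat, ∃ j : Int, 0 ≤ j ∧ j < 2 ^ k ∧ i = o * 2 ^ k + j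

theorem Desc.refl (o : Int) : Desc o o := ⟨0, 0, by norm_num⟩

theorem Desc.trans {o p i : Int} (h1 : Desc o p) (h2 : Desc p i) : Desc o i := by
  obtain ⟨a, j1, hj1, hj1', hp⟩ := h1
  obtain ⟨b, j2, hj2, hj2', hi⟩ := h2
  refine ⟨a + b, j1 * 2 ^ b + j2, by positivity, ?_, ?_⟩
  · have : (j1 + 1) * 2 ^ b ≤ 2 ^ a * 2 ^ b := by
      have h2b : (0:Int) < 2 ^ b := by positivity
      exact mul_le_mul_of_nonneg_right (by omega) (le_of_lt h2b)
    rw [pow_add]; nlinarith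
  · rw [pow_add, hi, hp]; ring

theorem desc_left (o : Int) : Desc o (o * 2) := ⟨1, 0, by norm_num⟩
theorem desc_right (o : Int) : Desc o (o * 2 + 1) := ⟨1, 1, by norm_num⟩

theorem desc_ge {o i : Int} (ho : 1 ≤ o) (h : Desc o i) : o ≤ i := by
  obtain ⟨k, j, hj, _, hi⟩ := h
  have h1 : (1:Int) ≤ 2 ^ k := one_le_pow₀ (by norm_num)
  nlinarith

theorem not_desc_left_self {o : Int} (ho : 1 ≤ o) : ¬ Desc (o * 2) o := fun h =>
  absurd (desc_ge (by omega) h) (by omega)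
theorem not_desc_right_self {o : Int} (ho : 1 ≤ o) : ¬ Desc (o * 2 + 1) o := fun h =>
  absurd (desc_ge (by omega) h) (by omega)

-- the two child subtrees are disjoint
theorem desc_disjoint {o i : Int} (ho : 1 ≤ o) (h1 : Desc (o * 2) i) (h2 : Desc (o * 2 + 1) i) : False := by
  obtain ⟨a, j1, hj1, hj1', hia⟩ := h1
  obtain ⟨b, j2, hj2, hj2', hib⟩ := h2
  rcases le_or_gt a b with hab | hab
  · -- i < (2o+1)·2^a ≤ (2o+1)·2^b ≤ i
    have hm : (2:Int) ^ a ≤ 2 ^ b := pow_le_pow_right₀ (by norm_num) hab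
    nlinarith
  · -- i < (2o+2)·2^b ≤ (o+1)·2^a ≤ 2o·2^a ≤ i
    have hba : b + 1 ≤ a := hab
    have hm : (2:Int) ^ (b + 1) ≤ 2 ^ a := pow_le_pow_right₀ (by norm_num) hba
    have hpb : (0:Int) < 2 ^ b := by positivity
    have hpa : (0:Int) < 2 ^ a := by positivity
    have h2b : (2:Int) ^ (b + 1) = 2 * 2 ^ b := by ring
    nlinarith

theorem desc_left_ne {o i : Int} (ho : 1 ≤ o) (hd : Desc (o * 2) i) : i ≠ o :=
  fun he => not_desc_left_self ho (he ▸ hd)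
theorem desc_right_ne {o i : Int} (ho : 1 ≤ o) (hd : Desc (o * 2 + 1) i) : i ≠ o :=
  fun he => not_desc_right_self ho (he ▸ hd)

theorem desc_child_trans_left {o i : Int} (h : Desc (o * 2) i) : Desc o i :=
  (desc_left o).trans h
theorem desc_child_trans_right {o i : Int} (h : Desc (o * 2 + 1) i) : Desc o i :=
  (desc_right o).trans h

-- midpoint bounds
theorem mid_bounds {l r : Int} (h : l < r) :
    l ≤ PySem.Int.floordiv (l + r) 2 ∧ PySem.Int.floordiv (l + r) 2 < r := by
  rw [PySem.Int.floordiv_eq_ediv_of_pos (by norm_num)]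
  omega

-- splitting a sum over Icc at the midpoint
theorem sum_Icc_split (f : Int → Int) {l m r : Int} (h1 : l ≤ m + 1) (h2 : m ≤ r) :
    ∑ i ∈ Finset.Icc l r, f i = (∑ i ∈ Finset.Icc l m, f i) + ∑ i ∈ Finset.Icc (m + 1) r, f i := by
  rw [← Finset.sum_union (by
    rw [Finset.disjoint_left]; intro x hx hy
    simp only [Finset.mem_Icc] at hx hy; omega)]
  congr 1
  ext i; simp only [Finset.mem_Icc, Finset.mem_union]; omega

theorem sum_Icc_bot (f : Int → Int) {a c : Int} (h : a ≤ c) :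
    ∑ i ∈ Finset.Icc a c, f i = f a + ∑ i ∈ Finset.Icc (a + 1) c, f i := by
  rw [sum_Icc_split f (show a ≤ a + 1 by omega) h, Finset.Icc_self, Finset.sum_singleton]

-- the lazy-tree invariant: node o of σ correctly represents f on [l, r]
def good (σ : AST) (o l r : Int) (f : Int → Int) : Prop :=
  σ.cnt o = ∑ i ∈ Finset.Icc l r, f i ∧
  ∀ _ : l < r,
    good σ (o * 2) l (PySem.Int.floordiv (l + r) 2)
      (if σ.flip o then fun i => 1 - f i else f) ∧
    good σ (o * 2 + 1) (PySem.Int.floordiv (l + r) 2 + 1) r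
      (if σ.flip o then fun i => 1 - f i else f)
termination_by (r - l).toNat
decreasing_by
  · have := mid_bounds ‹l < r›; omega
  · have := mid_bounds ‹l < r›; omega

theorem good_congr {σ : AST} {o l r : Int} {f g : Int → Int}
    (hfg : ∀ i, l ≤ i → i ≤ r → f i = g i) (h : good σ o l r f) : good σ o l r g := by
  have main : ∀ (N : Nat) (o l r : Int) (f g : Int → Int), (r - l).toNat ≤ N →
      (∀ i, l ≤ i → i ≤ r → f i = g i) → good σ o l r f → good σ o l r g := by
    intro N
    induction N with
    | zero =>
      intro o l r f g hN hfg h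
      rw [good] at h ⊢
      refine ⟨h.1.trans (Finset.sum_congr rfl fun i hi => ?_), fun hlr => absurd hlr (by omega)⟩
      simp only [Finset.mem_Icc] at hi; exact hfg i hi.1 hi.2
    | succ N ih =>
      intro o l r f g hN hfg h
      rw [good] at h ⊢
      refine ⟨h.1.trans (Finset.sum_congr rfl fun i hi => ?_), fun hlr => ?_⟩
      · simp only [Finset.mem_Icc] at hi; exact hfg i hi.1 hi.2
      · obtain ⟨hL, hR⟩ := h.2 hlr
        obtain ⟨hm1, hm2⟩ := mid_bounds hlr
        set m := PySem.Int.floordiv (l + r) 2 with hm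
        constructor
        · refine ih (o * 2) l m _ _ (by omega) (fun i h1 h2 => ?_) hL
          by_cases hfo : σ.flip o <;> simp [hfo, hfg i h1 (by omega)]
        · refine ih (o * 2 + 1) (m + 1) r _ _ (by omega) (fun i h1 h2 => ?_) hR
          by_cases hfo : σ.flip o <;> simp [hfo, hfg i (by omega) h2]
  exact main (r - l).toNat o l r f g (le_refl _) hfg h

theorem good_frame {σ σ' : AST} {o l r : Int} {f : Int → Int}
    (hc : ∀ i, Desc o i → σ'.cnt i = σ.cnt i)
    (hf : ∀ i, Desc o i → σ'.flip i = σ.flip i)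
    (h : good σ o l r f) : good σ' o l r f := by
  have main : ∀ (N : Nat) (o l r : Int) (f : Int → Int), (r - l).toNat ≤ N →
      (∀ i, Desc o i → σ'.cnt i = σ.cnt i) → (∀ i, Desc o i → σ'.flip i = σ.flip i) →
      good σ o l r f → good σ' o l r f := by
    intro N
    induction N with
    | zero =>
      intro o l r f hN hc hf h
      rw [good] at h ⊢
      exact ⟨(hc o (Desc.refl o)).trans h.1, fun hlr => absurd hlr (by omega)⟩
    | succ N ih =>
      intro o l r f hN hc hf h
      rw [good] at h ⊢
      refine ⟨(hc o (Desc.refl o)).trans h.1, fun hlr => ?_⟩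
      obtain ⟨hL, hR⟩ := h.2 hlr
      obtain ⟨hm1, hm2⟩ := mid_bounds hlr
      rw [hf o (Desc.refl o)]
      constructor
      · exact ih (o * 2) l _ _ (by omega) (fun i hi => hc i (desc_child_trans_left hi))
          (fun i hi => hf i (desc_child_trans_left hi)) hL
      · exact ih (o * 2 + 1) _ r _ (by omega) (fun i hi => hc i (desc_child_trans_right hi))
          (fun i hi => hf i (desc_child_trans_right hi)) hR
  exact main (r - l).toNat o l r f (le_refl _) hc hf h

theorem build_cnt_frame (nums1 : List Int) :
    ∀ (fuel : Nat) (o l r : Int) (σ : AST) (i : Int), ¬ Desc o i →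
      (pvBuild nums1 fuel o l r σ).cnt i = σ.cnt i := by
  intro fuel
  induction fuel with
  | zero => intro o l r σ i hi; rfl
  | succ fuel ih =>
    intro o l r σ i hi
    have hio : i ≠ o := fun he => hi (he ▸ Desc.refl o)
    simp only [pvBuild]
    split
    · exact Function.update_of_ne hio _ _
    · simp only [pvMaintain, Function.update_of_ne hio]
      rw [ih _ _ _ _ _ (fun hd => hi (desc_child_trans_right hd)),
          ih _ _ _ _ _ (fun hd => hi (desc_child_trans_left hd))]

theorem build_flip (nums1 : List Int) :
    ∀ (fuel : Nat) (o l r : Int) (σ : AST), (pvBuild nums1 fuel o l r σ).flip = σ.flip := by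
  intro fuel
  induction fuel with
  | zero => intro o l r σ; rfl
  | succ fuel ih =>
    intro o l r σ
    simp only [pvBuild]
    split
    · rfl
    · simp only [pvMaintain]; rw [ih, ih]

theorem build_good (nums1 : List Int) :
    ∀ (fuel : Nat) (o l r : Int) (σ : AST), 1 ≤ o → l ≤ r → (r - l).toNat < fuel →
      (∀ i, Desc o i → σ.flip i = false) →
      good (pvBuild nums1 fuel o l r σ) o l r (fun i => PySem.List.pyGetD nums1 (i - 1) 0) := by
  intro fuel
  induction fuel with
  | zero => intro o l r σ _ _ hN; omega
  | succ fuel ih =>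
    intro o l r σ ho hlr hN hflip
    by_cases hle : l = r
    · subst hle
      simp only [pvBuild, if_pos]
      rw [good]
      refine ⟨?_, fun hc => absurd hc (by omega)⟩
      simp [Function.update_self, Finset.Icc_self]
    · have hlr' : l < r := lt_of_le_of_ne hlr hle
      obtain ⟨hm1, hm2⟩ := mid_bounds hlr'
      simp only [pvBuild, if_neg hle]
      set m := PySem.Int.floordiv (l + r) 2 with hmdef
      set σ1 := pvBuild nums1 fuel (o * 2) l m σ with hσ1
      set σ2 := pvBuild nums1 fuel (o * 2 + 1) (m + 1) r σ1 with hσ2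
      have hgl : good σ1 (o * 2) l m (fun i => PySem.List.pyGetD nums1 (i - 1) 0) :=
        ih (o * 2) l m σ (by omega) (by omega) (by omega)
          (fun i hd => hflip i (desc_child_trans_left hd))
      have hflip1 : σ1.flip = σ.flip := build_flip nums1 fuel _ _ _ _
      have hgr : good σ2 (o * 2 + 1) (m + 1) r (fun i => PySem.List.pyGetD nums1 (i - 1) 0) :=
        ih (o * 2 + 1) (m + 1) r σ1 (by omega) (by omega) (by omega)
          (fun i hd => by rw [hflip1]; exact hflip i (desc_child_trans_right hd))
      have hflip2 : σ2.flip = σ.flip := by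
        rw [hσ2, build_flip nums1 fuel, hflip1]
      have hgl2 : good σ2 (o * 2) l m (fun i => PySem.List.pyGetD nums1 (i - 1) 0) := by
        refine good_frame (fun i hd => ?_) (fun i hd => ?_) hgl
        · exact build_cnt_frame nums1 fuel _ _ _ _ _ (fun hd' => desc_disjoint ho hd hd')
        · rw [hflip2, hflip1]
      have hne : ∀ i, Desc (o * 2) i ∨ Desc (o * 2 + 1) i → i ≠ o := by
        intro i hd he
        subst he
        rcases hd with hd | hd
        · exact not_desc_left_self ho hd
        · exact not_desc_right_self ho hd
      have hmc : (pvMaintain σ2 o).cnt = Function.update σ2.cnt o (σ2.cnt (o * 2) + σ2.cnt (o * 2 + 1)) := rfl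
      have hmf : (pvMaintain σ2 o).flip = σ2.flip := rfl
      have hglm : good (pvMaintain σ2 o) (o * 2) l m (fun i => PySem.List.pyGetD nums1 (i - 1) 0) := by
        refine good_frame (fun i hd => ?_) (fun i hd => ?_) hgl2
        · rw [hmc, Function.update_of_ne (hne i (Or.inl hd))]
        · rw [hmf]
      have hgrm : good (pvMaintain σ2 o) (o * 2 + 1) (m + 1) r (fun i => PySem.List.pyGetD nums1 (i - 1) 0) := by
        refine good_frame (fun i hd => ?_) (fun i hd => ?_) hgr
        · rw [hmc, Function.update_of_ne (hne i (Or.inr hd))]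
        · rw [hmf]
      rw [good]
      refine ⟨?_, fun _ => ?_⟩
      · rw [hmc, Function.update_self]
        have e1 : σ2.cnt (o * 2) = ∑ i ∈ Finset.Icc l m, PySem.List.pyGetD nums1 (i - 1) 0 := by
          have := hgl2; rw [good] at this; exact this.1
        have e2 : σ2.cnt (o * 2 + 1) = ∑ i ∈ Finset.Icc (m + 1) r, PySem.List.pyGetD nums1 (i - 1) 0 := by
          have := hgr; rw [good] at this; exact this.1
        rw [e1, e2]
        exact (sum_Icc_split (fun i => PySem.List.pyGetD nums1 (i - 1) 0) (show l ≤ m + 1 by omega) (le_of_lt hm2)).symm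
      · have hfo : (pvMaintain σ2 o).flip o = false := by
          rw [hmf, hflip2]; exact hflip o (Desc.refl o)
        rw [hfo]
        simp only [if_false, Bool.false_eq_true]
        exact ⟨hglm, hgrm⟩

theorem do_good {σ : AST} {o l r : Int} {f : Int → Int} (ho : 1 ≤ o) (hlr : l ≤ r)
    (h : good σ o l r f) : good (pvDo σ o l r) o l r (fun i => 1 - f i) := by
  rw [good] at h ⊢
  obtain ⟨h1, h2⟩ := h
  constructor
  · show Function.update σ.cnt o (r - l + 1 - σ.cnt o) o = _
    rw [Function.update_self, h1, Finset.sum_sub_distrib, Finset.sum_const, Int.card_Icc]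
    have : ((r + 1 - l).toNat : Int) = r + 1 - l := by omega
    simp only [nsmul_eq_mul, this]
    ring
  · intro hlr
    obtain ⟨hgl, hgr⟩ := h2 hlr
    obtain ⟨hm1, hm2⟩ := mid_bounds hlr
    have hfr : ∀ g o' l' r', (1 ≤ o') → o < o' → good σ o' l' r' g → good (pvDo σ o l r) o' l' r' g := by
      intro g o' l' r' ho' hoo' hg
      refine good_frame (fun i hd => ?_) (fun i hd => ?_) hg
      · exact Function.update_of_ne (by have := desc_ge ho' hd; omega) _ _
      · exact Function.update_of_ne (by have := desc_ge ho' hd; omega) _ _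
    have hflipnew : (pvDo σ o l r).flip o = !σ.flip o := Function.update_self _ _ _
    by_cases hfo : σ.flip o
    · rw [hfo] at hgl hgr
      rw [hflipnew, hfo]
      simp only [if_true, Bool.not_true, Bool.false_eq_true, if_false] at hgl hgr ⊢
      exact ⟨hfr _ _ _ _ (by omega) (by omega) hgl, hfr _ _ _ _ (by omega) (by omega) hgr⟩
    · rw [Bool.not_eq_true] at hfo
      rw [hfo] at hgl hgr
      rw [hflipnew, hfo]
      simp only [Bool.false_eq_true, if_false, Bool.not_false, if_true] at hgl hgr ⊢
      constructor
      · exact good_congr (fun i _ _ => by ring) (hfr _ _ _ _ (by omega) (by omega) hgl)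
      · exact good_congr (fun i _ _ => by ring) (hfr _ _ _ _ (by omega) (by omega) hgr)

theorem update_good :
    ∀ (fuel : Nat) (o l r L R : Int) (σ : AST) (f : Int → Int),
      (r - l).toNat < fuel → 1 ≤ o → l ≤ r → L ≤ R → L ≤ r → l ≤ R →
      good σ o l r f →
      (∀ i, ¬ Desc o i → (pvUpdate fuel o l r L R σ).cnt i = σ.cnt i ∧
                          (pvUpdate fuel o l r L R σ).flip i = σ.flip i) ∧
      good (pvUpdate fuel o l r L R σ) o l r (fun i => if L ≤ i ∧ i ≤ R then 1 - f i else f i) := by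
  intro fuel
  induction fuel with
  | zero => intro o l r L R σ f hN _ _ _ _ _ _; omega
  | succ fuel ih =>
    intro o l r L R σ f hN ho hlr hLR hLr hlR hg
    by_cases hcont : L ≤ l ∧ r ≤ R
    · -- fully contained: lazy flip at o
      have hstep : pvUpdate (fuel + 1) o l r L R σ = pvDo σ o l r := by
        simp only [pvUpdate, if_pos hcont]
      rw [hstep]
      constructor
      · intro i hi
        have hio : i ≠ o := fun he => hi (he ▸ Desc.refl o)
        exact ⟨Function.update_of_ne hio _ _, Function.update_of_ne hio _ _⟩
      · exact good_congr (fun i h1 h2 => by rw [if_pos ⟨by omega, by omega⟩]) (do_good ho hlr hg)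
    · have hlr' : l < r := by
        rcases eq_or_lt_of_le hlr with he | h
        · exact absurd ⟨by omega, by omega⟩ hcont
        · exact h
      obtain ⟨hm1, hm2⟩ := mid_bounds hlr'
      set m := PySem.Int.floordiv (l + r) 2 with hmdef
      have hgroot : σ.cnt o = ∑ i ∈ Finset.Icc l r, f i := by rw [good] at hg; exact hg.1
      obtain ⟨hgl, hgr⟩ := (by rw [good] at hg; exact hg.2 hlr' :
        good σ (o * 2) l m (if σ.flip o then fun i => 1 - f i else f) ∧
        good σ (o * 2 + 1) (m + 1) r (if σ.flip o then fun i => 1 - f i else f))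
      -- the target function
      set F : Int → Int := fun i => if L ≤ i ∧ i ≤ R then 1 - f i else f i with hFdef
      -- final step: maintain
      have hfinal : ∀ σ3 : AST,
          good σ3 (o * 2) l m F → good σ3 (o * 2 + 1) (m + 1) r F → σ3.flip o = false →
          (∀ i, ¬ Desc o i → σ3.cnt i = σ.cnt i ∧ σ3.flip i = σ.flip i) →
          (∀ i, ¬ Desc o i → (pvMaintain σ3 o).cnt i = σ.cnt i ∧ (pvMaintain σ3 o).flip i = σ.flip i) ∧
          good (pvMaintain σ3 o) o l r F := by
        intro σ3 hg3l hg3r hf3 hfr3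
        have hmc : (pvMaintain σ3 o).cnt = Function.update σ3.cnt o (σ3.cnt (o * 2) + σ3.cnt (o * 2 + 1)) := rfl
        have hmf : (pvMaintain σ3 o).flip = σ3.flip := rfl
        have hne : ∀ i, Desc (o * 2) i ∨ Desc (o * 2 + 1) i → i ≠ o := by
          intro i hd he
          subst he
          rcases hd with hd | hd
          · exact not_desc_left_self ho hd
          · exact not_desc_right_self ho hd
        constructor
        · intro i hi
          have hio : i ≠ o := fun he => hi (he ▸ Desc.refl o)
          rw [hmc, hmf, Function.update_of_ne hio]
          exact hfr3 i hi
        · rw [good]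
          refine ⟨?_, fun _ => ?_⟩
          · rw [hmc, Function.update_self]
            have e1 : σ3.cnt (o * 2) = ∑ i ∈ Finset.Icc l m, F i := by
              rw [good] at hg3l; exact hg3l.1
            have e2 : σ3.cnt (o * 2 + 1) = ∑ i ∈ Finset.Icc (m + 1) r, F i := by
              rw [good] at hg3r; exact hg3r.1
            rw [e1, e2]
            exact (sum_Icc_split F (by omega) (le_of_lt hm2)).symm
          · rw [hmf, hf3]
            simp only [Bool.false_eq_true, if_false]
            constructor
            · refine good_frame (fun i hd => ?_) (fun i hd => ?_) hg3l
              · rw [hmc, Function.update_of_ne (hne i (Or.inl hd))]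
              · rw [hmf]
            · refine good_frame (fun i hd => ?_) (fun i hd => ?_) hg3r
              · rw [hmc, Function.update_of_ne (hne i (Or.inr hd))]
              · rw [hmf]
      -- step 3: the (conditional) right-child update
      have hstep3 : ∀ σ2 : AST,
          good σ2 (o * 2) l m F → good σ2 (o * 2 + 1) (m + 1) r f → σ2.flip o = false →
          (∀ i, ¬ Desc o i → σ2.cnt i = σ.cnt i ∧ σ2.flip i = σ.flip i) →
          ∀ σ3 : AST, σ3 = (if m < R then pvUpdate fuel (o * 2 + 1) (m + 1) r L R σ2 else σ2) →
          good σ3 (o * 2) l m F ∧ good σ3 (o * 2 + 1) (m + 1) r F ∧ σ3.flip o = false ∧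
          (∀ i, ¬ Desc o i → σ3.cnt i = σ.cnt i ∧ σ3.flip i = σ.flip i) := by
        intro σ2 hg2l hg2r hf2 hfr2 σ3 hσ3
        by_cases hmR : m < R
        · rw [if_pos hmR] at hσ3
          obtain ⟨hfrU, hgU⟩ := ih (o * 2 + 1) (m + 1) r L R σ2 f (by omega) (by omega)
            (by omega) hLR (by omega) (by omega) hg2r
          rw [← hσ3] at hfrU hgU
          have hout : ∀ i, ¬ Desc (o * 2 + 1) i → σ3.cnt i = σ2.cnt i ∧ σ3.flip i = σ2.flip i := hfrU
          refine ⟨?_, hgU, ?_, ?_⟩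
          · refine good_frame (fun i hd => ?_) (fun i hd => ?_) hg2l
            · exact (hout i (fun hd' => desc_disjoint ho hd hd')).1
            · exact (hout i (fun hd' => desc_disjoint ho hd hd')).2
          · rw [(hout o (not_desc_right_self ho)).2, hf2]
          · intro i hi
            have h1 := hout i (fun hd => hi (desc_child_trans_right hd))
            exact ⟨h1.1.trans (hfr2 i hi).1, h1.2.trans (hfr2 i hi).2⟩
        · rw [if_neg hmR] at hσ3
          subst hσ3
          refine ⟨hg2l, ?_, hf2, hfr2⟩
          exact good_congr (fun i h1 h2 => by simp only [hFdef]; rw [if_neg (by omega)]) hg2r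
      -- step 2: the (conditional) left-child update
      have hstep2 : ∀ σ1 : AST,
          good σ1 (o * 2) l m f → good σ1 (o * 2 + 1) (m + 1) r f → σ1.flip o = false →
          (∀ i, ¬ Desc o i → σ1.cnt i = σ.cnt i ∧ σ1.flip i = σ.flip i) →
          ∀ σ2 : AST, σ2 = (if L ≤ m then pvUpdate fuel (o * 2) l m L R σ1 else σ1) →
          good σ2 (o * 2) l m F ∧ good σ2 (o * 2 + 1) (m + 1) r f ∧ σ2.flip o = false ∧
          (∀ i, ¬ Desc o i → σ2.cnt i = σ.cnt i ∧ σ2.flip i = σ.flip i) := by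
        intro σ1 hg1l hg1r hf1 hfr1 σ2 hσ2
        by_cases hLm : L ≤ m
        · rw [if_pos hLm] at hσ2
          obtain ⟨hfrU, hgU⟩ := ih (o * 2) l m L R σ1 f (by omega) (by omega)
            (by omega) hLR hLm hlR hg1l
          rw [← hσ2] at hfrU hgU
          have hout : ∀ i, ¬ Desc (o * 2) i → σ2.cnt i = σ1.cnt i ∧ σ2.flip i = σ1.flip i := hfrU
          refine ⟨hgU, ?_, ?_, ?_⟩
          · refine good_frame (fun i hd => ?_) (fun i hd => ?_) hg1r
            · exact (hout i (fun hd' => desc_disjoint ho hd' hd)).1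
            · exact (hout i (fun hd' => desc_disjoint ho hd' hd)).2
          · rw [(hout o (not_desc_left_self ho)).2, hf1]
          · intro i hi
            have h1 := hout i (fun hd => hi (desc_child_trans_left hd))
            exact ⟨h1.1.trans (hfr1 i hi).1, h1.2.trans (hfr1 i hi).2⟩
        · rw [if_neg hLm] at hσ2
          subst hσ2
          refine ⟨?_, hg1r, hf1, hfr1⟩
          exact good_congr (fun i h1 h2 => by simp only [hFdef]; rw [if_neg (by omega)]) hg1l
      -- step 1: the (conditional) push-down
      have hstep1 : ∀ σ1 : AST,
          σ1 = (if σ.flip o then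
                  { pvDo (pvDo σ (o * 2) l m) (o * 2 + 1) (m + 1) r with
                    flip := Function.update (pvDo (pvDo σ (o * 2) l m) (o * 2 + 1) (m + 1) r).flip o false }
                else σ) →
          good σ1 (o * 2) l m f ∧ good σ1 (o * 2 + 1) (m + 1) r f ∧ σ1.flip o = false ∧
          (∀ i, ¬ Desc o i → σ1.cnt i = σ.cnt i ∧ σ1.flip i = σ.flip i) := by
        intro σ1 hσ1
        by_cases hfo : σ.flip o
        · rw [if_pos hfo] at hσ1
          rw [hfo] at hgl hgr
          simp only [if_true] at hgl hgr
          set σa := pvDo σ (o * 2) l m with hσa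
          set σb := pvDo σa (o * 2 + 1) (m + 1) r with hσb
          -- writes of the two pvDo's and the flip reset
          have hac : ∀ i, i ≠ o * 2 → σa.cnt i = σ.cnt i := fun i hi => Function.update_of_ne hi _ _
          have haf : ∀ i, i ≠ o * 2 → σa.flip i = σ.flip i := fun i hi => Function.update_of_ne hi _ _
          have hbc : ∀ i, i ≠ o * 2 + 1 → σb.cnt i = σa.cnt i := fun i hi => Function.update_of_ne hi _ _
          have hbf : ∀ i, i ≠ o * 2 + 1 → σb.flip i = σa.flip i := fun i hi => Function.update_of_ne hi _ _
          have h1c : σ1.cnt = σb.cnt := by rw [hσ1]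
          have h1f : ∀ i, i ≠ o → σ1.flip i = σb.flip i := by
            intro i hi; rw [hσ1]; exact Function.update_of_ne hi _ _
          have hga : good σa (o * 2) l m f := by
            have h := do_good (show (1:Int) ≤ o * 2 by omega) (show l ≤ m by omega) hgl
            exact good_congr (fun i _ _ => by ring) h
          have hgb : good σb (o * 2 + 1) (m + 1) r f := by
            have hfr : good σa (o * 2 + 1) (m + 1) r (fun i => 1 - f i) := by
              refine good_frame (fun i hd => hac i ?_) (fun i hd => haf i ?_) hgr <;>
                exact fun he => desc_disjoint ho (he ▸ Desc.refl (o * 2)) hd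
            have h := do_good (show (1:Int) ≤ o * 2 + 1 by omega) (show m + 1 ≤ r by omega) hfr
            exact good_congr (fun i _ _ => by ring) h
          refine ⟨?_, ?_, ?_, ?_⟩
          · refine good_frame (fun i hd => ?_) (fun i hd => ?_) hga
            · rw [h1c, hbc i (fun he => desc_disjoint ho hd (he ▸ Desc.refl _))]
            · rw [h1f i (desc_left_ne ho hd), hbf i (fun he => desc_disjoint ho hd (he ▸ Desc.refl _))]
          · refine good_frame (fun i hd => ?_) (fun i hd => ?_) hgb
            · rw [h1c]
            · rw [h1f i (desc_right_ne ho hd)]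
          · rw [hσ1]; exact Function.update_self _ _ _
          · intro i hi
            have hio : i ≠ o := fun he => hi (he ▸ Desc.refl o)
            have hil : i ≠ o * 2 := fun he => hi (he ▸ desc_left o)
            have hir : i ≠ o * 2 + 1 := fun he => hi (he ▸ desc_right o)
            exact ⟨h1c ▸ (hbc i hir).trans (hac i hil),
                   (h1f i hio).trans ((hbf i hir).trans (haf i hil))⟩
        · rw [if_neg hfo] at hσ1
          subst hσ1
          rw [Bool.not_eq_true] at hfo
          rw [hfo] at hgl hgr
          simp only [Bool.false_eq_true, if_false] at hgl hgr
          exact ⟨hgl, hgr, hfo, fun i _ => ⟨rfl, rfl⟩⟩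
      -- assemble
      have hgoal : pvUpdate (fuel + 1) o l r L R σ =
          pvMaintain (if m < R then pvUpdate fuel (o * 2 + 1) (m + 1) r L R
              (if L ≤ m then pvUpdate fuel (o * 2) l m L R
                (if σ.flip o then
                  { pvDo (pvDo σ (o * 2) l m) (o * 2 + 1) (m + 1) r with
                    flip := Function.update (pvDo (pvDo σ (o * 2) l m) (o * 2 + 1) (m + 1) r).flip o false }
                 else σ) else
                (if σ.flip o then
                  { pvDo (pvDo σ (o * 2) l m) (o * 2 + 1) (m + 1) r with
                    flip := Function.update (pvDo (pvDo σ (o * 2) l m) (o * 2 + 1) (m + 1) r).flip o false }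
                 else σ)) else
              (if L ≤ m then pvUpdate fuel (o * 2) l m L R
                (if σ.flip o then
                  { pvDo (pvDo σ (o * 2) l m) (o * 2 + 1) (m + 1) r with
                    flip := Function.update (pvDo (pvDo σ (o * 2) l m) (o * 2 + 1) (m + 1) r).flip o false }
                 else σ) else
                (if σ.flip o then
                  { pvDo (pvDo σ (o * 2) l m) (o * 2 + 1) (m + 1) r with
                    flip := Function.update (pvDo (pvDo σ (o * 2) l m) (o * 2 + 1) (m + 1) r).flip o false }
                 else σ))) o := by
        simp only [pvUpdate, if_neg hcont]
        rfl
      rw [hgoal]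
      obtain ⟨g1l, g1r, g1f, g1fr⟩ := hstep1 _ rfl
      obtain ⟨g2l, g2r, g2f, g2fr⟩ := hstep2 _ g1l g1r g1f g1fr _ rfl
      obtain ⟨g3l, g3r, g3f, g3fr⟩ := hstep3 _ g2l g2r g2f g2fr _ rfl
      exact hfinal _ g3l g3r g3f g3fr

-- ---- B-side: the flat bit list as a 1-indexed function ----
def fB (bits : List Int) (i : Int) : Int := bits.getD (i - 1).toNat 0

theorem sum_fB : ∀ (bits : List Int),
    ∑ i ∈ Finset.Icc (1 : Int) (bits.length : Int), fB bits i = bits.sum := by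
  intro bits
  induction bits using List.reverseRecOn with
  | nil => simp
  | append_singleton xs x ih =>
    have hlen : ((xs ++ [x]).length : Int) = (xs.length : Int) + 1 := by simp
    rw [hlen, sum_Icc_split (fB (xs ++ [x])) (m := (xs.length : Int)) (by omega) (by omega), Finset.Icc_self, Finset.sum_singleton]
    have h1 : ∑ i ∈ Finset.Icc (1 : Int) (xs.length : Int), fB (xs ++ [x]) i
        = ∑ i ∈ Finset.Icc (1 : Int) (xs.length : Int), fB xs i := by
      refine Finset.sum_congr rfl fun i hi => ?_
      simp only [Finset.mem_Icc] at hi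
      unfold fB
      rw [List.getD_append _ _ _ _ (by omega)]
    have h2 : fB (xs ++ [x]) ((xs.length : Int) + 1) = x := by
      unfold fB
      have : ((xs.length : Int) + 1 - 1).toNat = xs.length := by omega
      rw [this]
      simp [List.getD]
    rw [h1, h2, ih, List.sum_append, List.sum_cons, List.sum_nil]
    ring

theorem sum_flip (f : Int → Int) {a b lo hi : Int} (h1 : a ≤ lo) (h2 : hi ≤ b) :
    ∑ i ∈ Finset.Icc a b, (if lo ≤ i ∧ i ≤ hi then 1 - f i else f i)
      = (∑ i ∈ Finset.Icc a b, f i) + ∑ i ∈ Finset.Icc lo hi, (1 - 2 * f i) := by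
  have key : ∀ i ∈ Finset.Icc a b,
      (if lo ≤ i ∧ i ≤ hi then 1 - f i else f i)
        = f i + (if lo ≤ i ∧ i ≤ hi then 1 - 2 * f i else 0) := by
    intro i _
    by_cases h : lo ≤ i ∧ i ≤ hi
    · rw [if_pos h, if_pos h]; ring
    · rw [if_neg h, if_neg h]; ring
  rw [Finset.sum_congr rfl key, Finset.sum_add_distrib]
  congr 1
  rw [← Finset.sum_subset (show Finset.Icc lo hi ⊆ Finset.Icc a b by
        intro x hx; simp only [Finset.mem_Icc] at *; omega)
      (fun x _ hx => by
        rw [if_neg (fun hc => hx (by simp only [Finset.mem_Icc]; omega))])]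
  refine Finset.sum_congr rfl fun i hi => ?_
  simp only [Finset.mem_Icc] at hi
  rw [if_pos (by omega)]

-- the inner flip loop of B
theorem flip_loop : ∀ (k : Nat) (l r : Int) (bits : List Int) (ones : Int), 0 ≤ l →
    r < (bits.length : Int) → (r + 1 - l).toNat = k →
    ((PySem.List.pyRange l (r + 1) 1).foldl
        (fun (p : List Int × Int) i =>
          (PySem.List.pySetD p.1 i (1 - PySem.List.pyGetD p.1 i 0),
           p.2 + (1 - 2 * PySem.List.pyGetD p.1 i 0))) (bits, ones)).1.length = bits.length ∧
    (∀ j : Int, 1 ≤ j →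
      fB ((PySem.List.pyRange l (r + 1) 1).foldl
        (fun (p : List Int × Int) i =>
          (PySem.List.pySetD p.1 i (1 - PySem.List.pyGetD p.1 i 0),
           p.2 + (1 - 2 * PySem.List.pyGetD p.1 i 0))) (bits, ones)).1 j
        = if l + 1 ≤ j ∧ j ≤ r + 1 then 1 - fB bits j else fB bits j) ∧
    ((PySem.List.pyRange l (r + 1) 1).foldl
        (fun (p : List Int × Int) i =>
          (PySem.List.pySetD p.1 i (1 - PySem.List.pyGetD p.1 i 0),
           p.2 + (1 - 2 * PySem.List.pyGetD p.1 i 0))) (bits, ones)).2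
      = ones + ∑ j ∈ Finset.Icc (l + 1) (r + 1), (1 - 2 * fB bits j) := by
  intro k
  induction k with
  | zero =>
    intro l r bits ones hl hr hk
    have hnil : PySem.List.pyRange l (r + 1) 1 = [] := PySem.List.pyRange_one_eq_nil (by omega)
    rw [hnil]
    refine ⟨by rw [List.foldl_nil], fun j hj => ?_, ?_⟩
    · rw [List.foldl_nil, if_neg (by omega)]
    · rw [List.foldl_nil, Finset.Icc_eq_empty (by omega), Finset.sum_empty]
      simp
  | succ k ihk =>
    intro l r bits ones hl hr hk
    have hlr : l ≤ r := by omega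
    have hcons : PySem.List.pyRange l (r + 1) 1 = l :: PySem.List.pyRange (l + 1) (r + 1) 1 :=
      PySem.List.pyRange_one_cons (by omega)
    rw [hcons, List.foldl_cons]
    have hlt : l.toNat < bits.length := by omega
    have hgd : PySem.List.pyGetD bits l 0 = fB bits (l + 1) := by
      rw [PySem.List.pyGetD_eq_getElem bits 0 hl (by omega)]
      unfold fB
      have : (l + 1 - 1).toNat = l.toNat := by omega
      rw [this, List.getD_eq_getElem _ _ hlt]
    have hset : PySem.List.pySetD bits l (1 - PySem.List.pyGetD bits l 0)
        = bits.set l.toNat (1 - fB bits (l + 1)) := by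
      rw [PySem.List.pySetD_of_nonneg bits _ hl, hgd]
    set bits1 := bits.set l.toNat (1 - fB bits (l + 1)) with hb1
    have hlen1 : bits1.length = bits.length := by rw [hb1, List.length_set]
    have hfB1 : ∀ j : Int, 1 ≤ j → fB bits1 j = if j = l + 1 then 1 - fB bits j else fB bits j := by
      intro j hj
      unfold fB
      rw [hb1]
      by_cases hje : j = l + 1
      · subst hje
        rw [if_pos rfl]
        have ht : (l + 1 - 1).toNat = l.toNat := by omega
        rw [ht, List.getD_eq_getElem _ _ (by simpa using hlt), List.getElem_set_self]
        unfold fB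
        rw [ht, List.getD_eq_getElem _ _ hlt]
      · rw [if_neg hje]
        have hne : (j - 1).toNat ≠ l.toNat ∨ (bits.length ≤ (j - 1).toNat) := by omega
        rcases hne with hne | hbig
        · simp only [List.getD, List.getElem?_set_ne (by omega : l.toNat ≠ (j - 1).toNat)]
        · rw [List.getD_eq_default _ _ (by simp; omega), List.getD_eq_default _ _ (by omega)]
    have ih := ihk (l + 1) r bits1 (ones + (1 - 2 * PySem.List.pyGetD bits l 0))
      (by omega) (by omega : r < (bits1.length : Int)) (by omega)
    rw [hset] at *
    obtain ⟨ih1, ih2, ih3⟩ := ih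
    refine ⟨ih1.trans hlen1, fun j hj => ?_, ?_⟩
    · rw [ih2 j hj, hfB1 j hj]
      by_cases hje : j = l + 1
      · subst hje
        rw [if_neg (by omega), if_pos rfl, if_pos (by omega)]
      · rw [if_neg hje]
        by_cases hin : l + 1 + 1 ≤ j ∧ j ≤ r + 1
        · rw [if_pos hin, if_pos (by omega)]
        · rw [if_neg hin, if_neg (by omega)]
    · rw [ih3, hgd]
      have hc : ∑ j ∈ Finset.Icc (l + 1 + 1) (r + 1), (1 - 2 * fB bits1 j)
          = ∑ j ∈ Finset.Icc (l + 1 + 1) (r + 1), (1 - 2 * fB bits j) := by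
        refine Finset.sum_congr rfl fun j hj => ?_
        simp only [Finset.mem_Icc] at hj
        rw [hfB1 j (by omega), if_neg (by omega)]
      rw [hc, sum_Icc_bot (fun j => 1 - 2 * fB bits j) (show l + 1 ≤ r + 1 by omega)]
      ring

theorem len3 {q : List Int} (h : q.length = 3) : ∃ a b c : Int, q = [a, b, c] := by
  match q, h with
  | [a, b, c], _ => exact ⟨a, b, c, rfl⟩

-- the two query loops walk in lockstep
theorem main_loop : ∀ (qs : List (List Int)) (n : Int) (σ : AST) (bits : List Int)
    (ones s : Int) (ans : List Int),
    1 ≤ n → (bits.length : Int) = n →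
    (∀ q ∈ qs, q.length = 3 ∧
      (q.getD 0 0 = 1 → 0 ≤ q.getD 1 0 ∧ q.getD 1 0 ≤ q.getD 2 0 ∧ q.getD 2 0 < n)) →
    good σ 1 1 n (fB bits) → ones = ∑ i ∈ Finset.Icc 1 n, fB bits i →
    (qs.foldl (fun (st : AST × List Int × Int) q =>
      match q with
      | [op, l, r] =>
        if op = 1 then (pvUpdate (n.toNat + 1) 1 1 n (l + 1) (r + 1) st.1, st.2.1, st.2.2)
        else if op = 2 then (st.1, st.2.1, st.2.2 + l * st.1.cnt 1)
        else (st.1, st.2.1 ++ [st.2.2], st.2.2)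
      | _ => st) (σ, ans, s)).2.1
    = (qs.foldl (fun (st : List Int × Int × Int × List Int) q =>
      let op := q.getD 0 0
      let l := q.getD 1 0
      let r := q.getD 2 0
      if op = 1 then
        let p := (PySem.List.pyRange l (r + 1) 1).foldl
          (fun (p : List Int × Int) i =>
            let old := PySem.List.pyGetD p.1 i 0
            (PySem.List.pySetD p.1 i (1 - old), p.2 + (1 - 2 * old)))
          (st.1, st.2.1)
        (p.1, p.2, st.2.2)
      else if op = 2 then (st.1, st.2.1, st.2.2.1 + l * st.2.1, st.2.2.2)
      else (st.1, st.2.1, st.2.2.1, st.2.2.2 ++ [st.2.2.1])) (bits, ones, s, ans)).2.2.2 := by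
  intro qs
  induction qs with
  | nil => intro n σ bits ones s ans _ _ _ _ _; rfl
  | cons q qs ih =>
    intro n σ bits ones s ans hn hlen hq hg hones
    obtain ⟨hq3, hqP⟩ := hq q (List.mem_cons_self ..)
    obtain ⟨op, l, r, rfl⟩ := len3 hq3
    have hqs : ∀ q' ∈ qs, q'.length = 3 ∧
        (q'.getD 0 0 = 1 → 0 ≤ q'.getD 1 0 ∧ q'.getD 1 0 ≤ q'.getD 2 0 ∧ q'.getD 2 0 < n) :=
      fun q' hq' => hq q' (List.mem_cons_of_mem _ hq')
    simp only [List.foldl_cons]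
    rw [show ([op, l, r].getD 0 0 : Int) = op from rfl,
        show ([op, l, r].getD 1 0 : Int) = l from rfl,
        show ([op, l, r].getD 2 0 : Int) = r from rfl]
    by_cases hop1 : op = 1
    · subst hop1
      have hP : 0 ≤ l ∧ l ≤ r ∧ r < n := by
        have := hqP (by simp)
        simpa using this
      rw [if_pos rfl, if_pos rfl]
      -- A side
      obtain ⟨_, hgood'⟩ := update_good (n.toNat + 1) 1 1 n (l + 1) (r + 1) σ (fB bits)
        (by omega) (by omega) (by omega) (by omega) (by omega) (by omega) hg
      -- B side
      obtain ⟨hL, hFb, hOnes⟩ := flip_loop (r + 1 - l).toNat l r bits ones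
        (by omega) (by omega) rfl
      refine ih n _ _ _ _ _ hn (by rw [hL]; exact hlen) hqs ?_ ?_
      · refine good_congr (fun i h1 h2 => ?_) hgood'
        rw [hFb i (by omega)]
      · rw [hOnes]
        have hsum : ∑ i ∈ Finset.Icc (1:Int) n,
            fB ((PySem.List.pyRange l (r + 1) 1).foldl
              (fun (p : List Int × Int) i =>
                (PySem.List.pySetD p.1 i (1 - PySem.List.pyGetD p.1 i 0),
                 p.2 + (1 - 2 * PySem.List.pyGetD p.1 i 0))) (bits, ones)).1 i
            = ∑ i ∈ Finset.Icc (1:Int) n,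
                (if l + 1 ≤ i ∧ i ≤ r + 1 then 1 - fB bits i else fB bits i) :=
          Finset.sum_congr rfl fun i hi => by
            simp only [Finset.mem_Icc] at hi
            exact hFb i (by omega)
        rw [hsum, sum_flip (fB bits) (by omega) (by omega), hones]
    · rw [if_neg hop1, if_neg hop1]
      by_cases hop2 : op = 2
      · subst hop2
        rw [if_pos rfl, if_pos rfl]
        have hc1 : σ.cnt 1 = ones := by
          rw [good] at hg; rw [hones]; exact hg.1
        rw [hc1]
        exact ih n _ _ _ _ _ hn hlen hqs hg hones
      · rw [if_neg hop2, if_neg hop2]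
        exact ih n _ _ _ _ _ hn hlen hqs hg hones

-- ===== VERDICT (by name: the statement is the Claim_ definition above) =====
theorem handleQuery_spec : Claim_equal_handleQuery := by
  intro nums1 nums2 queries hdom hpre
  obtain ⟨hne, hqs⟩ := hpre
  have hn : 1 ≤ (nums1.length : Int) := by
    cases nums1 with
    | nil => exact absurd rfl hne
    | cons a t => simp
  show handleQuery nums1 nums2 queries = handleQuery_alt nums1 nums2 queries
  unfold handleQuery handleQuery_alt
  refine main_loop queries (nums1.length : Int) _ nums1 nums1.sum nums2.sum [] hn rfl hqs ?_ ?_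
  · have hb := build_good nums1 ((nums1.length : Int).toNat + 1) 1 1 (nums1.length : Int)
      ⟨fun _ => 0, fun _ => false⟩ (by omega) (by omega) (by omega) (fun i _ => rfl)
    refine good_congr (fun i h1 h2 => ?_) hb
    rw [PySem.List.pyGetD_eq_getElem nums1 0 (by omega) (by omega)]
    unfold fB
    rw [List.getD_eq_getElem _ _ (by omega)]
  · exact (sum_fB nums1).symm
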